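-- pv_equiv track=rewrite | github.com/mAbduqayum/python-workbook | dicts/is_phrase_anagram/is_phrase_anagram.py | is_phrase_anagram
-- ===== SOURCE A (Python) =====
-- def is_phrase_anagram(phrase1: str, phrase2: str) -> bool:
--     clean1 = phrase1.lower().replace(" ", "")
--     clean2 = phrase2.lower().replace(" ", "")
--
--     freq1 = {}
--     for char in clean1:
--         if char in freq1:
--             freq1[char] = freq1[char] + 1
--         else:
--             freq1[char] = 1
--
--     freq2 = {}
--     for char in clean2:
--         if char in freq2:
--             freq2[char] = freq2[char] + 1
--         else:
--             freq2[char] = 1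
--
--     return freq1 == freq2
-- ===== SOURCE B (Python) =====
-- def is_phrase_anagram(phrase1: str, phrase2: str) -> bool:
--     clean1 = phrase1.lower().replace(" ", "")
--     clean2 = phrase2.lower().replace(" ", "")
--     return sorted(clean1) == sorted(clean2)
-- ===== Notes on version B (the rewrite author's own statement) =====
-- stated objective: simpler
-- what changed: Replaces the two hand-rolled frequency-dictionary loops and dict comparison with a single sort-and-compare of the cleaned character sequences.
import Mathlib
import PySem

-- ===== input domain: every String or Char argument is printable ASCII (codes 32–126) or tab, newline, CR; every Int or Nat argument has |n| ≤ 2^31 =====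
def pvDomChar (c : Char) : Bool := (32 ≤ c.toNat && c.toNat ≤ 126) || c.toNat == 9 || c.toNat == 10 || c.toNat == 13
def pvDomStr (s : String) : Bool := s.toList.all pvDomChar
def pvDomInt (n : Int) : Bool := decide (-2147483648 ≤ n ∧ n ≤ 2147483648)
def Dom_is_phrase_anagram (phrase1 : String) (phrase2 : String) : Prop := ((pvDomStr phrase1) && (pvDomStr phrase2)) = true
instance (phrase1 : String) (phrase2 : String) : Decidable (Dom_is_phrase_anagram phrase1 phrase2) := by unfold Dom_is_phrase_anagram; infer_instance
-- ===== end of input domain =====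

-- B replaces A's two frequency-dictionary loops with sorting the cleaned character lists and comparing them (simpler decomposition, not claimed faster).


-- ===== PORT A =====
-- Python's dict == ignores insertion order: same keys as a set, same value at every key.
def pvDictEq (d1 d2 : PySem.Dict Char Int) : Bool :=
  PySem.Set.equal d1.keys d2.keys && d1.keys.all (fun k => d1.get? k == d2.get? k)

def is_phrase_anagram (phrase1 : String) (phrase2 : String) : Bool :=
  let clean1 := PySem.Str.replace (PySem.Str.lower phrase1) " " ""
  let clean2 := PySem.Str.replace (PySem.Str.lower phrase2) " " ""
  let freq1 := clean1.toList.foldl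
    (fun d char => if d.contains char then d.insert char (d.getD char 0 + 1) else d.insert char 1)
    PySem.Dict.empty
  let freq2 := clean2.toList.foldl
    (fun d char => if d.contains char then d.insert char (d.getD char 0 + 1) else d.insert char 1)
    PySem.Dict.empty
  pvDictEq freq1 freq2

-- ===== PORT B =====
def is_phrase_anagram_alt (phrase1 : String) (phrase2 : String) : Bool :=
  let clean1 := PySem.Str.replace (PySem.Str.lower phrase1) " " ""
  let clean2 := PySem.Str.replace (PySem.Str.lower phrase2) " " ""
  PySem.List.sorted clean1.toList (fun c => c) false == PySem.List.sorted clean2.toList (fun c => c) false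

-- ===== PRECONDITION & SPEC =====
def Spec_is_phrase_anagram (phrase1 : String) (phrase2 : String) (out : Bool) : Prop := out = is_phrase_anagram_alt phrase1 phrase2
instance (phrase1 : String) (phrase2 : String) (out : Bool) : Decidable (Spec_is_phrase_anagram phrase1 phrase2 out) := by unfold Spec_is_phrase_anagram; infer_instance

-- ===== CLAIM (what is proved, stated in full; the proofs are below) =====
def Claim_equal_is_phrase_anagram : Prop := ∀ (phrase1 : String) (phrase2 : String), Dom_is_phrase_anagram phrase1 phrase2 → Spec_is_phrase_anagram phrase1 phrase2 (is_phrase_anagram phrase1 phrase2)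

-- ===== LEMMAS AND PROOFS =====

-- A's loop body coincides with the unconditional 'd[char] = d.get(char, 0) + 1' step.
theorem pv_loop_eq_counter (xs : List Char) :
    xs.foldl (fun d char => if d.contains char then d.insert char (d.getD char 0 + 1) else d.insert char 1)
      PySem.Dict.empty = PySem.Dict.counter xs := by
  rw [← PySem.Dict.foldl_insert_getD_add_one_eq_counter]
  apply PySem.List.foldl_congr_mem
  intro d c _
  by_cases h : d.contains c = true
  · simp [h]
  · have h0 : d.getD c 0 = 0 := by
      rw [PySem.Dict.getD_of_not_contains]
      simpa using h
    simp [h, h0]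

theorem pv_get?_counter (xs : List Char) (c : Char) :
    (PySem.Dict.counter xs).get? c = if c ∈ xs then some (xs.count c : Int) else none := by
  by_cases h : c ∈ xs
  · have hc : (PySem.Dict.counter xs).contains c = true := by
      simp [PySem.Dict.contains_counter, h]
    rw [PySem.Dict.contains_eq_isSome_get?] at hc
    obtain ⟨v, hv⟩ := Option.isSome_iff_exists.mp hc
    have hg : (PySem.Dict.counter xs).getD c 0 = v := by
      rw [PySem.Dict.getD_eq_get?_getD, hv]; rfl
    rw [PySem.Dict.getD_counter] at hg
    simp [h, hv, ← hg]
  · have hc : (PySem.Dict.counter xs).get? c = none := by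
      rw [PySem.Dict.get?_eq_none_iff_not_mem_keys]
      simp [PySem.Dict.keys_counter, PySem.Set.mem_ofList, h]
    simp [h, hc]

theorem pv_dictEq_counter (xs ys : List Char) :
    pvDictEq (PySem.Dict.counter xs) (PySem.Dict.counter ys) = true ↔ xs.Perm ys := by
  constructor
  · intro h
    simp only [pvDictEq, Bool.and_eq_true, List.all_eq_true] at h
    obtain ⟨hk, hv⟩ := h
    rw [PySem.Set.equal_iff] at hk
    simp only [PySem.Dict.keys_counter, PySem.Set.mem_ofList] at hk hv
    rw [List.perm_iff_count]
    intro c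
    by_cases hc : c ∈ xs
    · have := hv c hc
      rw [pv_get?_counter, pv_get?_counter] at this
      simp [hc, (hk c).mp hc] at this
      exact_mod_cast this
    · have hcy : c ∉ ys := fun hy => hc ((hk c).mpr hy)
      simp [List.count_eq_zero_of_not_mem, hc, hcy]
  · intro h
    have hcnt : ∀ c, xs.count c = ys.count c := List.perm_iff_count.mp h
    have hmem : ∀ c : Char, c ∈ xs ↔ c ∈ ys := fun c => by
      rw [← List.count_pos_iff, ← List.count_pos_iff, hcnt c]
    simp only [pvDictEq, Bool.and_eq_true, List.all_eq_true]
    constructor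
    · rw [PySem.Set.equal_iff]
      simp only [PySem.Dict.keys_counter, PySem.Set.mem_ofList]; exact hmem
    · intro c hc
      simp only [PySem.Dict.keys_counter, PySem.Set.mem_ofList] at hc
      rw [pv_get?_counter, pv_get?_counter]
      simp [hc, (hmem c).mp hc, hcnt c]

-- ===== VERDICT (by name: the statement is the Claim_ definition above) =====
theorem is_phrase_anagram_spec : Claim_equal_is_phrase_anagram := by
  intro phrase1 phrase2 _
  unfold Spec_is_phrase_anagram is_phrase_anagram is_phrase_anagram_alt
  simp only [pv_loop_eq_counter]
  rw [Bool.eq_iff_iff, beq_iff_eq, PySem.List.sorted_id_eq_sorted_id_iff_perm]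
  exact pv_dictEq_counter _ _
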